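-- pv_equiv track=rewrite | github.com/william1908/Universita | Programmazione_dei_calcolatori/python/Liste.py | intersezione_liste
-- ===== SOURCE A (Python) =====
-- def intersezione_liste( a, b ):
--     '''
--     input: a, b: liste
--     output: lista c contenente gli elementi che sono sia in a che in b, senza ripetizioni
--     '''
--     d, c = {}, {} # O(1)
--
--     for e in b:  # m iterazioni
--         d[e] = None  # O(1)
--
--     for e in a: # n iterazioni
--         if e in d: # O(1) + O(1)
--             c[e] = None # O(1)
--
--     c = [ k for k in c ] # O( min(n, m) )
--
--     return c
-- ===== SOURCE B (Python) =====
-- def intersezione_liste(a, b):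
--     # Sort a's (value, position) pairs by value and sort b; sweep the two sorted
--     # sequences in step: each run of equal values in pa yields its smallest
--     # position, kept when the value is found in sorted b; finally sort the hits
--     # by position to restore first-occurrence order.
--     pa = sorted(zip(a, range(len(a))), key=lambda p: p[0])
--     sb = sorted(b)
--     hits = []
--     j = 0
--     k = 0
--     n = len(pa)
--     while k < n:
--         e, i = pa[k]
--         k += 1
--         while k < n and pa[k][0] == e:
--             if pa[k][1] < i:
--                 i = pa[k][1]
--             k += 1
--         while j < len(sb) and sb[j] < e:
--             j += 1
--         if j < len(sb) and sb[j] == e: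
--             hits.append((i, e))
--     hits.sort(key=lambda p: p[0])
--     return [e for _, e in hits]
-- ===== Notes on version B (the rewrite author's own statement) =====
-- stated objective: alternative
-- what changed: A hash-indexes b and collects hits from a in a second dict whose keys it lists; B sorts a's (value,position) pairs and b, sweeps the two sorted sequences in step taking each value run's minimal position when the value occurs in b, and sorts the hits back by position.
import Mathlib
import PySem

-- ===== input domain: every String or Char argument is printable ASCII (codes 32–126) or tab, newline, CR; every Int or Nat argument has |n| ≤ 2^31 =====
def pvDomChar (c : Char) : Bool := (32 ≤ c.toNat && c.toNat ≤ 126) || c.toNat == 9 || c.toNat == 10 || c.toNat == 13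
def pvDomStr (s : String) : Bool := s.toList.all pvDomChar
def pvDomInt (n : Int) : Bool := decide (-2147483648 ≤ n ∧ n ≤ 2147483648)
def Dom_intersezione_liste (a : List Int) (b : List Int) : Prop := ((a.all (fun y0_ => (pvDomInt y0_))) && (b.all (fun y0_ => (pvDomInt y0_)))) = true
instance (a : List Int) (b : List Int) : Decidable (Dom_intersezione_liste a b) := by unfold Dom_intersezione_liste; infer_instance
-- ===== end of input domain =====

-- B replaces A's "hash-index b, collect hits in a second dict, list its keys" with a
-- sort-and-sweep algorithm: sort a's (value,position) pairs and b, merge the two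
-- sorted sequences taking each value run's minimal position, sort the hits back by
-- position (alternative algorithm; return value only, neither program mutates its arguments).

-- ===== PORT A =====
def intersezione_liste (a : List Int) (b : List Int) : List Int :=
  -- d, c = {}, {}
  let d : PySem.Dict Int (Option Unit) := PySem.Dict.empty
  let c : PySem.Dict Int (Option Unit) := PySem.Dict.empty
  -- for e in b: d[e] = None
  let d := b.foldl (fun d e => d.insert e none) d
  -- for e in a: if e in d: c[e] = None
  let c := a.foldl (fun c e => if d.contains e then c.insert e none else c) c
  -- c = [k for k in c]
  c.keys

-- ===== PORT B =====
-- the `while k < n` sweep of Source B: head of each run of equal values, the run folded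
-- to its minimal position (the inner `while ... pa[k][0] == e` loop), the persistent
-- j pointer into sb represented by passing the undiscarded suffix of sb down
def pvMerge (pa : List (Int × Int)) (sb : List Int) : List (Int × Int) :=
  match pa with
  | [] => []
  | (e, i) :: rest =>
    let i0 := (rest.takeWhile (fun q => q.1 == e)).foldl (fun m q => min m q.2) i
    let rest' := rest.dropWhile (fun q => q.1 == e)
    let sb' := sb.dropWhile (fun x => x < e)
    let out := pvMerge rest' sb'
    if sb'.head? == some e then (i0, e) :: out else out
termination_by pa.length
decreasing_by simpa using Nat.lt_succ_of_le (List.dropWhile_sublist _).length_le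

def intersezione_liste_alt (a : List Int) (b : List Int) : List Int :=
  -- pa = sorted(zip(a, range(len(a))), key=lambda p: p[0])
  let pa := PySem.List.sorted (a.zip (PySem.List.pyRange 0 (a.length : Int) 1)) (fun p => p.1) false
  -- sb = sorted(b)
  let sb := PySem.List.sorted b (fun x => x) false
  -- the sweep loop collecting hits
  let hits := pvMerge pa sb
  -- hits.sort(key=lambda p: p[0])
  let hits2 := PySem.List.sorted hits (fun p => p.1) false
  -- [e for _, e in hits]
  hits2.map (fun p => p.2)

-- ===== PRECONDITION & SPEC =====
def Spec_intersezione_liste (a : List Int) (b : List Int) (out : List Int) : Prop := out = intersezione_liste_alt a b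
instance (a : List Int) (b : List Int) (out : List Int) : Decidable (Spec_intersezione_liste a b out) := by unfold Spec_intersezione_liste; infer_instance

-- ===== CLAIM (what is proved, stated in full; the proofs are below) =====
def Claim_equal_intersezione_liste : Prop := ∀ (a : List Int) (b : List Int), Dom_intersezione_liste a b → Spec_intersezione_liste a b (intersezione_liste a b)

-- ===== LEMMAS AND PROOFS =====

-- ---------- A-side: the dict fold as an append-if-unseen accumulator fold ----------

-- The index dict d contains e exactly when e ∈ b.
theorem pv_d_contains (b : List Int) (e : Int) :
    ((b.foldl (fun d x => d.insert x (none : Option Unit)) PySem.Dict.empty).contains e) = b.contains e := by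
  rw [PySem.Dict.contains_eq_decide_mem_keys,
      PySem.Dict.keys_foldl_insert b (fun _ _ => (none : Option Unit)) PySem.Dict.empty]
  simp [PySem.Set.mem_update]

-- Invariant of A's second loop: its dict's key list equals the accumulator-style
-- "append if in b and not yet seen" fold.
theorem pv_loop (a b : List Int) (d : PySem.Dict Int (Option Unit))
    (hd : ∀ e, d.contains e = b.contains e)
    (c : PySem.Dict Int (Option Unit)) (hnd : c.keys.Nodup) :
    (a.foldl (fun c e => if d.contains e then c.insert e none else c) c).keys
      = a.foldl (fun l e => if b.contains e && !(l.contains e) then l ++ [e] else l) c.keys := by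
  induction a generalizing c with
  | nil => simp
  | cons x xs ih =>
    simp only [List.foldl_cons, hd x]
    by_cases hc : c.contains x = true
    · have hk : x ∈ c.keys := (PySem.Dict.contains_iff_mem_keys c x).1 hc
      have hck : (c.keys.contains x) = true := by simpa using hk
      by_cases hb : b.contains x = true
      · simp only [hb, if_true, hck, Bool.not_true, Bool.and_false, Bool.false_eq_true, if_false]
        have h2 := ih (c.insert x none) (PySem.Dict.nodup_keys_insert c x none hnd)
        rwa [PySem.Dict.keys_insert_of_contains c (none : Option Unit) hc] at h2
      · simp only [hb, Bool.false_eq_true, if_false, Bool.false_and]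
        exact ih c hnd
    · have hcf : c.contains x = false := by simpa using hc
      have hk : x ∉ c.keys := fun h => hc ((PySem.Dict.contains_iff_mem_keys c x).2 h)
      have hck : (c.keys.contains x) = false := by simpa using hk
      by_cases hb : b.contains x = true
      · simp only [hb, if_true, hck, Bool.not_false, Bool.and_true]
        have hnd' : (c.insert x (none : Option Unit)).keys.Nodup := PySem.Dict.nodup_keys_insert c x none hnd
        have h2 := ih (c.insert x none) hnd'
        rwa [PySem.Dict.keys_insert_of_not_contains c (none : Option Unit) hcf] at h2
      · simp only [hb, Bool.false_eq_true, if_false, Bool.false_and]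
        exact ih c hnd

-- ---------- a canonical first-occurrence recursion on values ----------
def pvGv (a : List Int) (b : List Int) : List Int :=
  match a with
  | [] => []
  | h :: t =>
    let rest := pvGv (t.filter (fun x => x != h)) b
    if b.contains h then h :: rest else rest
termination_by a.length
decreasing_by simpa using Nat.lt_succ_of_le (List.length_filter_le _ t)

theorem pvGv_nil (b : List Int) : pvGv [] b = [] := by
  rw [pvGv.eq_def]

theorem pvGv_cons (h : Int) (t b : List Int) :
    pvGv (h :: t) b
      = (if b.contains h then
           h :: pvGv (t.filter (fun x => x != h)) b
         else pvGv (t.filter (fun x => x != h)) b) := by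
  rw [pvGv.eq_def]

-- Filtering out one element commutes (as the filters form one conjunction).
theorem pv_filter_comm {α : Type} (t : List α) (p q : α -> Bool) :
    (t.filter p).filter q = (t.filter q).filter p := by
  simp only [List.filter_filter]
  exact List.filter_congr (fun x _ => Bool.and_comm _ _)

-- Elements not in b are transparent to pvGv: filtering them out changes nothing.
theorem pv_skip_aux (b : List Int) (h : Int) (hb : b.contains h = false) :
    ∀ (n : Nat) (a : List Int), a.length ≤ n →
      pvGv a b = pvGv (a.filter (fun x => x != h)) b := by
  intro n
  induction n with
  | zero =>
    intro a ha
    have : a = [] := List.eq_nil_of_length_eq_zero (Nat.le_zero.mp ha)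
    subst this; simp
  | succ n ih =>
    intro a ha
    match a with
    | [] => simp
    | k :: t =>
      by_cases hk : k = h
      · subst hk
        simp only [List.filter_cons, bne_self_eq_false, Bool.false_eq_true, if_false]
        rw [pvGv_cons, hb]
        simp
      · have hkh : (k != h) = true := by simpa using hk
        simp only [List.filter_cons, hkh, if_true]
        rw [pvGv_cons, pvGv_cons]
        have hlen : (t.filter (fun x => x != k)).length ≤ n := by
          have h1 := List.length_filter_le (fun x => x != k) t
          have h2 : t.length ≤ n := Nat.le_of_succ_le_succ (by simpa using ha)
          omega
        have hrec := ih (t.filter (fun x => x != k)) hlen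
        rw [pv_filter_comm t (fun x => x != h) (fun x => x != k)]
        rw [← hrec]

theorem pv_skip (a b : List Int) (h : Int) (hb : b.contains h = false) :
    pvGv a b = pvGv (a.filter (fun x => x != h)) b :=
  pv_skip_aux b h hb a.length a (Nat.le_refl _)

-- Main A-side bridge: the accumulator fold starting from c equals c ++ pvGv on the
-- not-yet-seen part.
theorem pv_fold_gv (b : List Int) (a : List Int) (c : List Int) :
    a.foldl (fun l e => if b.contains e && !(l.contains e) then l ++ [e] else l) c
      = c ++ pvGv (a.filter (fun x => !(c.contains x))) b := by
  induction a generalizing c with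
  | nil => simp [pvGv_nil]
  | cons h t ih =>
    simp only [List.foldl_cons, List.filter_cons]
    by_cases hc : c.contains h = true
    · simp only [hc, Bool.not_true, Bool.and_false, Bool.false_eq_true, if_false]
      exact ih c
    · have hcf : c.contains h = false := by simpa using hc
      simp only [hcf, Bool.not_false, Bool.and_true, if_true]
      by_cases hb : b.contains h = true
      · simp only [hb, if_true]
        rw [ih (c ++ [h]), pvGv_cons, hb]
        simp only [if_true, List.filter_filter, List.append_assoc, List.singleton_append]
        congr 3
        apply List.filter_congr
        intro x _
        by_cases hx : x = h <;> simp [hx]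
      · have hbf : b.contains h = false := by simpa using hb
        simp only [hbf, Bool.false_eq_true, if_false]
        rw [ih c, pvGv_cons, hbf]
        simp only [Bool.false_eq_true, if_false]
        congr 1
        rw [pv_skip (t.filter (fun x => !c.contains x)) b h hbf]

-- ---------- an indexed variant of the canonical recursion ----------
-- pvGidx runs on (value, position) pairs and records the position of each first hit.
def pvGidx (pz : List (Int × Int)) (b : List Int) : List (Int × Int) :=
  match pz with
  | [] => []
  | (e, i) :: rest =>
    let out := pvGidx (rest.filter (fun q => q.1 != e)) b
    if b.contains e then (i, e) :: out else out
termination_by pz.length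
decreasing_by
  simp only [List.length_unattach, List.length_cons]
  exact Nat.lt_succ_of_le (le_trans (List.length_filter_le _ _) (by simp))

theorem pvGidx_nil (b : List Int) : pvGidx [] b = [] := by
  rw [pvGidx.eq_def]

theorem pvGidx_cons (e i : Int) (rest : List (Int × Int)) (b : List Int) :
    pvGidx ((e, i) :: rest) b
      = (if b.contains e then
           (i, e) :: pvGidx (rest.filter (fun q => q.1 != e)) b
         else pvGidx (rest.filter (fun q => q.1 != e)) b) := by
  rw [pvGidx.eq_def]

-- Projecting pvGidx to values gives pvGv on the projected list.
theorem pvGidx_map_snd_aux (b : List Int) :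
    ∀ (n : Nat) (pz : List (Int × Int)), pz.length ≤ n →
      (pvGidx pz b).map Prod.snd = pvGv (pz.map Prod.fst) b := by
  intro n
  induction n with
  | zero =>
    intro pz hl
    have : pz = [] := List.eq_nil_of_length_eq_zero (Nat.le_zero.mp hl)
    subst this; simp [pvGidx_nil, pvGv_nil]
  | succ n ih =>
    intro pz hl
    match pz with
    | [] => simp [pvGidx_nil, pvGv_nil]
    | (e, i) :: rest =>
      rw [pvGidx_cons]
      simp only [List.map_cons]
      rw [pvGv_cons]
      have hlen : (rest.filter (fun q => q.1 != e)).length ≤ n := by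
        have h1 := List.length_filter_le (fun q : Int × Int => q.1 != e) rest
        have h2 : rest.length ≤ n := Nat.le_of_succ_le_succ (by simpa using hl)
        omega
      have hmapf : (rest.filter (fun q => q.1 != e)).map Prod.fst
          = (rest.map Prod.fst).filter (fun x => x != e) := by
        rw [List.filter_map]
        rfl
      have hrec := ih (rest.filter (fun q => q.1 != e)) hlen
      by_cases hb : b.contains e = true
      · simp only [hb, if_true, List.map_cons]
        rw [hrec, hmapf]
      · simp only [hb, Bool.false_eq_true, if_false]
        rw [hrec, hmapf]

theorem pvGidx_map_snd (pz : List (Int × Int)) (b : List Int) :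
    (pvGidx pz b).map Prod.snd = pvGv (pz.map Prod.fst) b :=
  pvGidx_map_snd_aux b pz.length pz (Nat.le_refl _)

-- Membership characterisation of pvGidx on a position-increasing pair list:
-- exactly the first (minimal-position) pair of each value that occurs in b.
theorem pv_mem_Gidx_aux (b : List Int) :
    ∀ (n : Nat) (pz : List (Int × Int)), pz.length ≤ n →
      pz.Pairwise (fun p q => p.2 < q.2) →
      ∀ (i e : Int), ((i, e) ∈ pvGidx pz b
        ↔ (e ∈ b ∧ (e, i) ∈ pz ∧ ∀ q ∈ pz, q.1 = e → i ≤ q.2)) := by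
  intro n
  induction n with
  | zero =>
    intro pz hl _ i e
    have : pz = [] := List.eq_nil_of_length_eq_zero (Nat.le_zero.mp hl)
    subst this; simp [pvGidx_nil]
  | succ n ih =>
    intro pz hl hz i e
    match pz with
    | [] => simp [pvGidx_nil]
    | (e0, i0) :: rest =>
      have hz' := (List.pairwise_cons.mp hz)
      have hi0 : ∀ q ∈ rest, i0 < q.2 := hz'.1
      have hrestpw : rest.Pairwise (fun p q : Int × Int => p.2 < q.2) := hz'.2
      have hlen : (rest.filter (fun q => q.1 != e0)).length ≤ n := by
        have h1 := List.length_filter_le (fun q : Int × Int => q.1 != e0) rest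
        have h2 : rest.length ≤ n := Nat.le_of_succ_le_succ (by simpa using hl)
        omega
      have hfpw : (rest.filter (fun q => q.1 != e0)).Pairwise (fun p q : Int × Int => p.2 < q.2) :=
        List.Pairwise.sublist List.filter_sublist hrestpw
      have IH := ih (rest.filter (fun q => q.1 != e0)) hlen hfpw i e
      rw [pvGidx_cons]
      by_cases he : e = e0
      · subst he
        have hnotin : ((i, e) ∈ pvGidx (rest.filter (fun q => q.1 != e)) b) = False := by
          simp only [eq_iff_iff, iff_false]
          intro hmem
          have := (IH.mp hmem).2.1
          have h1 := List.of_mem_filter this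
          simp at h1
        constructor
        · intro hmem
          by_cases hb : b.contains e = true
          · simp only [hb, if_true, List.mem_cons] at hmem
            rcases hmem with hmem | hmem
            · have hie : i = i0 := by
                simpa using congrArg Prod.fst hmem
              subst hie
              refine ⟨by simpa using hb, List.mem_cons_self .., ?_⟩
              intro q hq _
              rcases List.mem_cons.mp hq with hq | hq
              · subst hq; exact le_refl _
              · exact le_of_lt (hi0 q hq)
            · exact absurd hmem (by simpa using hnotin)
          · simp only [hb, Bool.false_eq_true, if_false] at hmem
            exact absurd hmem (by simpa using hnotin)
        · rintro ⟨hb, hmem, hmin⟩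
          have hb' : b.contains e = true := by simpa using hb
          simp only [hb', if_true, List.mem_cons]
          left
          have hie : i = i0 := by
            rcases List.mem_cons.mp hmem with hq | hq
            · simpa using congrArg Prod.snd hq
            · have hlt := hi0 _ hq
              have hle := hmin (e, i) (List.mem_cons_of_mem _ hq) rfl
              have hle0 := hmin (e, i0) (List.mem_cons_self ..) rfl
              simp at hlt hle hle0
              omega
          subst hie; rfl
      · have hne : (e ≠ e0) := he
        have hmemf : ((e, i) ∈ rest.filter (fun q => q.1 != e0)) ↔ (e, i) ∈ rest := by
          constructor
          · exact fun h => List.mem_of_mem_filter h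
          · intro h
            refine List.mem_filter.mpr ⟨h, ?_⟩
            simpa using hne
        have step : ((i, e) ∈ pvGidx ((e0, i0) :: rest) b)
            ↔ ((i, e) ∈ pvGidx (rest.filter (fun q => q.1 != e0)) b) := by
          rw [pvGidx_cons]
          by_cases hb : b.contains e0 = true
          · simp only [hb, if_true, List.mem_cons]
            constructor
            · rintro (h | h)
              · exact absurd (congrArg Prod.snd h) (by simpa using hne)
              · exact h
            · exact fun h => Or.inr h
          · rw [if_neg hb]
        rw [← pvGidx_cons, step, IH]
        constructor
        · rintro ⟨hb, hmem, hmin⟩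
          refine ⟨hb, List.mem_cons_of_mem _ (hmemf.mp hmem), ?_⟩
          intro q hq hq1
          rcases List.mem_cons.mp hq with hq' | hq'
          · exfalso
            rw [hq'] at hq1
            simp at hq1
            exact hne hq1.symm
          · have : q ∈ rest.filter (fun q => q.1 != e0) := by
              refine List.mem_filter.mpr ⟨hq', ?_⟩
              simpa [hq1] using hne
            exact hmin q this hq1
        · rintro ⟨hb, hmem, hmin⟩
          have hmem' : (e, i) ∈ rest := by
            rcases List.mem_cons.mp hmem with h | h
            · exact absurd (congrArg Prod.fst h) (by simpa using hne)
            · exact h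
          refine ⟨hb, hmemf.mpr hmem', ?_⟩
          intro q hq hq1
          exact hmin q (List.mem_cons_of_mem _ (List.mem_of_mem_filter hq)) hq1

theorem pv_mem_Gidx (pz : List (Int × Int)) (b : List Int)
    (hz : pz.Pairwise (fun p q => p.2 < q.2)) (i e : Int) :
    (i, e) ∈ pvGidx pz b ↔ (e ∈ b ∧ (e, i) ∈ pz ∧ ∀ q ∈ pz, q.1 = e → i ≤ q.2) :=
  pv_mem_Gidx_aux b pz.length pz (Nat.le_refl _) hz i e

-- pvGidx inherits strictly increasing positions (hence it is duplicate-free).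
theorem pv_pairwise_Gidx_aux (b : List Int) :
    ∀ (n : Nat) (pz : List (Int × Int)), pz.length ≤ n →
      pz.Pairwise (fun p q => p.2 < q.2) →
      (pvGidx pz b).Pairwise (fun p q => p.1 < q.1) := by
  intro n
  induction n with
  | zero =>
    intro pz hl _
    have : pz = [] := List.eq_nil_of_length_eq_zero (Nat.le_zero.mp hl)
    subst this; simp [pvGidx_nil]
  | succ n ih =>
    intro pz hl hz
    match pz with
    | [] => simp [pvGidx_nil]
    | (e0, i0) :: rest =>
      have hz' := List.pairwise_cons.mp hz
      have hi0 : ∀ q ∈ rest, i0 < q.2 := hz'.1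
      have hrestpw : rest.Pairwise (fun p q : Int × Int => p.2 < q.2) := hz'.2
      have hlen : (rest.filter (fun q => q.1 != e0)).length ≤ n := by
        have h1 := List.length_filter_le (fun q : Int × Int => q.1 != e0) rest
        have h2 : rest.length ≤ n := Nat.le_of_succ_le_succ (by simpa using hl)
        omega
      have hfpw : (rest.filter (fun q => q.1 != e0)).Pairwise (fun p q : Int × Int => p.2 < q.2) :=
        List.Pairwise.sublist List.filter_sublist hrestpw
      have IH := ih (rest.filter (fun q => q.1 != e0)) hlen hfpw
      rw [pvGidx_cons]
      by_cases hb : b.contains e0 = true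
      · simp only [hb, if_true]
        refine List.pairwise_cons.mpr ⟨?_, IH⟩
        intro q hq
        have hmem := (pv_mem_Gidx _ b hfpw q.1 q.2).mp (by simpa using hq)
        have : (q.2, q.1) ∈ rest := List.mem_of_mem_filter hmem.2.1
        have := hi0 _ this
        simpa using this
      · simp only [hb, Bool.false_eq_true, if_false]
        exact IH

-- ---------- facts about the sweep (pvMerge) ----------

theorem pvMerge_nil (sb : List Int) : pvMerge [] sb = [] := by
  rw [pvMerge.eq_def]

theorem pvMerge_cons (e i : Int) (rest : List (Int × Int)) (sb : List Int) :
    pvMerge ((e, i) :: rest) sb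
      = (if (sb.dropWhile (fun x => x < e)).head? == some e then
           ((rest.takeWhile (fun q => q.1 == e)).foldl (fun m q => min m q.2) i, e)
             :: pvMerge (rest.dropWhile (fun q => q.1 == e)) (sb.dropWhile (fun x => x < e))
         else pvMerge (rest.dropWhile (fun q => q.1 == e)) (sb.dropWhile (fun x => x < e))) := by
  rw [pvMerge.eq_def]

-- on a sorted list, the head surviving dropWhile (< e) is e iff e is in the list
theorem pv_head_drop (sb : List Int) (hsb : sb.Pairwise (fun x y => x ≤ y)) (e : Int) :
    ((sb.dropWhile (fun x => decide (x < e))).head? = some e) ↔ e ∈ sb := by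
  induction sb with
  | nil => simp
  | cons x t ih =>
    have hx : ∀ y ∈ t, x ≤ y := (List.pairwise_cons.mp hsb).1
    have ht : t.Pairwise (fun x y => x ≤ y) := (List.pairwise_cons.mp hsb).2
    by_cases hlt : x < e
    · rw [List.dropWhile_cons_of_pos (by simpa using hlt)]
      rw [ih ht]
      constructor
      · exact fun h => List.mem_cons_of_mem _ h
      · intro h
        rcases List.mem_cons.mp h with h | h
        · omega
        · exact h
    · rw [List.dropWhile_cons_of_neg (by simpa using hlt)]
      simp only [List.head?_cons, Option.some.injEq]
      constructor
      · intro h; subst h; exact List.mem_cons_self ..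
      · intro h
        rcases List.mem_cons.mp h with h | h
        · exact h.symm
        · have := hx _ h
          omega

-- membership in a dropWhile (< e0) suffix is unchanged for values ≥ e0
theorem pv_mem_drop (sb : List Int) (e0 e : Int) (he : e0 ≤ e) :
    (e ∈ sb.dropWhile (fun x => decide (x < e0))) ↔ e ∈ sb := by
  induction sb with
  | nil => simp
  | cons x t ih =>
    by_cases hlt : x < e0
    · rw [List.dropWhile_cons_of_pos (by simpa using hlt)]
      rw [ih]
      constructor
      · exact fun h => List.mem_cons_of_mem _ h
      · intro h
        rcases List.mem_cons.mp h with h | h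
        · omega
        · exact h
    · rw [List.dropWhile_cons_of_neg (by simpa using hlt)]

-- values in the part of rest beyond the head's run are strictly larger
theorem pv_rest_big (e0 : Int) (rest : List (Int × Int))
    (hpw : rest.Pairwise (fun p q => p.1 ≤ q.1))
    (hge : ∀ q ∈ rest, e0 ≤ q.1) :
    ∀ q ∈ rest.dropWhile (fun q => q.1 == e0), e0 < q.1 := by
  induction rest with
  | nil => simp
  | cons r t ih =>
    have h1 : ∀ q ∈ t, r.1 ≤ q.1 := (List.pairwise_cons.mp hpw).1
    have h2 : t.Pairwise (fun p q : Int × Int => p.1 ≤ q.1) := (List.pairwise_cons.mp hpw).2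
    by_cases hr : r.1 = e0
    · rw [List.dropWhile_cons_of_pos (by simpa using hr)]
      exact ih h2 (fun q hq => hge q (List.mem_cons_of_mem _ hq))
    · rw [List.dropWhile_cons_of_neg (by simpa using hr)]
      intro q hq
      rcases List.mem_cons.mp hq with hq | hq
      · have := hge r (List.mem_cons_self ..)
        rw [hq]
        omega
      · have := h1 q hq
        have := hge r (List.mem_cons_self ..)
        omega

-- run elements carry the head's value
theorem pv_run_val (e0 : Int) (rest : List (Int × Int)) :
    ∀ q ∈ rest.takeWhile (fun q => q.1 == e0), q.1 = e0 := by
  intro q hq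
  have := List.mem_takeWhile_imp hq
  simpa using this

-- the run's min fold: a member (or the seed) and a lower bound
theorem pv_fold_min_mem (run : List (Int × Int)) :
    ∀ (i : Int), (run.foldl (fun m q => min m q.2) i = i)
      ∨ (∃ q ∈ run, run.foldl (fun m q => min m q.2) i = q.2) := by
  induction run with
  | nil => intro i; exact Or.inl rfl
  | cons r t ih =>
    intro i
    simp only [List.foldl_cons]
    rcases ih (min i r.2) with h | ⟨q, hq, h⟩
    · by_cases hle : i ≤ r.2
      · left; rw [h]; exact min_eq_left hle
      · right
        refine ⟨r, List.mem_cons_self .., ?_⟩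
        rw [h]; exact min_eq_right (le_of_lt (not_le.mp hle))
    · right; exact ⟨q, List.mem_cons_of_mem _ hq, h⟩

theorem pv_fold_min_le (run : List (Int × Int)) :
    ∀ (i : Int), run.foldl (fun m q => min m q.2) i ≤ i
      ∧ ∀ q ∈ run, run.foldl (fun m q => min m q.2) i ≤ q.2 := by
  induction run with
  | nil => intro i; exact ⟨le_refl _, by simp⟩
  | cons r t ih =>
    intro i
    simp only [List.foldl_cons]
    have h := ih (min i r.2)
    constructor
    · exact le_trans h.1 (min_le_left _ _)
    · intro q hq
      rcases List.mem_cons.mp hq with hq | hq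
      · subst hq; exact le_trans h.1 (min_le_right _ _)
      · exact h.2 q hq

-- Membership characterisation of the sweep on sorted inputs.
theorem pv_mem_merge_aux :
    ∀ (n : Nat) (pa : List (Int × Int)) (sb : List Int), pa.length ≤ n →
      pa.Pairwise (fun p q => p.1 ≤ q.1) → sb.Pairwise (fun x y => x ≤ y) →
      ∀ (i e : Int), ((i, e) ∈ pvMerge pa sb
        ↔ (e ∈ sb ∧ (e, i) ∈ pa ∧ ∀ q ∈ pa, q.1 = e → i ≤ q.2)) := by
  intro n
  induction n with
  | zero =>
    intro pa sb hl _ _ i e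
    have : pa = [] := List.eq_nil_of_length_eq_zero (Nat.le_zero.mp hl)
    subst this; simp [pvMerge_nil]
  | succ n ih =>
    intro pa sb hl hpa hsb i e
    match pa with
    | [] => simp [pvMerge_nil]
    | (e0, i0) :: rest =>
      have hp' := List.pairwise_cons.mp hpa
      have hge : ∀ q ∈ rest, e0 ≤ q.1 := hp'.1
      have hrestpw : rest.Pairwise (fun p q : Int × Int => p.1 ≤ q.1) := hp'.2
      set run := rest.takeWhile (fun q => q.1 == e0) with hrun
      set rest' := rest.dropWhile (fun q => q.1 == e0) with hrest'
      set sb' := sb.dropWhile (fun x => x < e0) with hsb'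
      have hsplit : run ++ rest' = rest := List.takeWhile_append_dropWhile ..
      have hbig : ∀ q ∈ rest', e0 < q.1 := pv_rest_big e0 rest hrestpw hge
      have hrunval : ∀ q ∈ run, q.1 = e0 := pv_run_val e0 rest
      have hlen : rest'.length ≤ n := by
        have h1 : rest'.length ≤ rest.length := (List.dropWhile_sublist _).length_le
        have h2 : rest.length ≤ n := Nat.le_of_succ_le_succ (by simpa using hl)
        omega
      have hpw' : rest'.Pairwise (fun p q : Int × Int => p.1 ≤ q.1) :=
        List.Pairwise.sublist (List.dropWhile_sublist _) hrestpw
      have hsbpw' : sb'.Pairwise (fun x y : Int => x ≤ y) :=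
        List.Pairwise.sublist (List.dropWhile_sublist _) hsb
      have IH := ih rest' sb' hlen hpw' hsbpw'
      have hhead : ((sb'.head? = some e0)) ↔ e0 ∈ sb := by
        have := pv_head_drop sb hsb e0
        simpa [hsb'] using this
      set i0' := run.foldl (fun m q => min m q.2) i0 with hi0'
      have hmin_le := pv_fold_min_le run i0
      have hmin_mem := pv_fold_min_mem run i0
      rw [← hi0'] at hmin_le hmin_mem
      rw [pvMerge_cons]
      by_cases he : e = e0
      · subst he
        -- the recursive part never contains value e
        have hnot : ¬ ((i, e) ∈ pvMerge rest' sb') := by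
          intro hmem
          have h2 := (IH i e).mp hmem
          have := hbig _ h2.2.1
          simp at this
        have hminchar : ((e, i) ∈ ((e, i0) :: rest) ∧ (∀ q ∈ (e, i0) :: rest, q.1 = e → i ≤ q.2))
            ↔ i = i0' := by
          constructor
          · rintro ⟨hmem, hmn⟩
            have hlei : i ≤ i0' := by
              rcases hmin_mem with h | ⟨q, hq, h⟩
              · rw [h]; exact hmn (e, i0) (List.mem_cons_self ..) rfl
              · rw [h]
                refine hmn q ?_ (hrunval q hq)
                refine List.mem_cons_of_mem _ ?_
                rw [← hsplit]; exact List.mem_append_left _ hq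
            have hgei : i0' ≤ i := by
              rcases List.mem_cons.mp hmem with h | h
              · have : i = i0 := by simpa using congrArg Prod.snd h
                subst this; exact hmin_le.1
              · rw [← hsplit] at h
                rcases List.mem_append.mp h with h | h
                · exact hmin_le.2 _ h
                · have := hbig _ h; simp at this
            omega
          · intro hi; subst hi
            constructor
            · rcases hmin_mem with h | ⟨q, hq, h⟩
              · rw [h]; exact List.mem_cons_self ..
              · rw [h]
                refine List.mem_cons_of_mem _ ?_
                have hq1 : q.1 = e := hrunval q hq
                have : q ∈ rest := by rw [← hsplit]; exact List.mem_append_left _ hq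
                have : (e, q.2) ∈ rest := by rwa [← hq1, Prod.mk.eta]
                exact this
            · intro q hq hq1
              rcases List.mem_cons.mp hq with h | h
              · subst h; exact hmin_le.1
              · rw [← hsplit] at h
                rcases List.mem_append.mp h with h | h
                · exact hmin_le.2 _ h
                · have := hbig _ h; rw [hq1] at this; omega
        by_cases hc : sb'.head? = some e
        · rw [if_pos (by simpa using hc)]
          simp only [List.mem_cons]
          constructor
          · rintro (h | h)
            · have hi : i = i0' := by simpa using congrArg Prod.fst h
              have hmc := hminchar.mpr hi
              exact ⟨hhead.mp hc, List.mem_cons.mp hmc.1, fun q hq => hmc.2 q (List.mem_cons.mpr hq)⟩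
            · exact absurd h hnot
          · rintro ⟨hb, hmem, hmn⟩
            left
            have := hminchar.mp ⟨List.mem_cons.mpr hmem, fun q hq => hmn q (List.mem_cons.mp hq)⟩
            rw [this]
        · rw [if_neg (by simpa using hc)]
          constructor
          · intro h; exact absurd h hnot
          · rintro ⟨hb, _, _⟩
            exact absurd (hhead.mpr hb) hc
      · -- e ≠ e0: reduce to the recursive call
        have hstep : ((i, e) ∈ pvMerge ((e0, i0) :: rest) sb) ↔ (i, e) ∈ pvMerge rest' sb' := by
          rw [pvMerge_cons]
          by_cases hc : sb'.head? = some e0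
          · rw [if_pos (by simpa using hc)]
            simp only [List.mem_cons]
            constructor
            · rintro (h | h)
              · exact absurd (by simpa using congrArg Prod.snd h) he
              · exact h
            · exact fun h => Or.inr h
          · rw [if_neg (by simpa using hc)]
        rw [← pvMerge_cons]
        rw [hstep, IH]
        by_cases hmem : (e, i) ∈ rest'
        · have he0e : e0 < e := by
            have := hbig _ hmem; simpa using this
          have hsbm : (e ∈ sb') ↔ e ∈ sb := by
            have := pv_mem_drop sb e0 e (le_of_lt he0e)
            simpa [hsb'] using this
          constructor
          · rintro ⟨h1, h2, h3⟩
            refine ⟨hsbm.mp h1, ?_, ?_⟩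
            · refine List.mem_cons_of_mem _ ?_
              rw [← hsplit]; exact List.mem_append_right _ h2
            · intro q hq hq1
              rcases List.mem_cons.mp hq with h | h
              · exfalso; apply he; rw [← hq1, h]
              · rw [← hsplit] at h
                rcases List.mem_append.mp h with h | h
                · exfalso; apply he; rw [← hq1, hrunval q h]
                · exact h3 q h hq1
          · rintro ⟨h1, h2, h3⟩
            refine ⟨hsbm.mpr h1, hmem, ?_⟩
            intro q hq hq1
            refine h3 q ?_ hq1
            refine List.mem_cons_of_mem _ ?_
            rw [← hsplit]; exact List.mem_append_right _ hq
        · constructor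
          · rintro ⟨_, h2, _⟩
            exact absurd h2 hmem
          · rintro ⟨_, h2, _⟩
            exfalso
            rcases List.mem_cons.mp h2 with h | h
            · exact he (by simpa using congrArg Prod.fst h)
            · rw [← hsplit] at h
              rcases List.mem_append.mp h with h | h
              · exact he (hrunval _ h)
              · exact hmem h

theorem pv_mem_merge (pa : List (Int × Int)) (sb : List Int)
    (hpa : pa.Pairwise (fun p q => p.1 ≤ q.1)) (hsb : sb.Pairwise (fun x y => x ≤ y))
    (i e : Int) :
    (i, e) ∈ pvMerge pa sb ↔ (e ∈ sb ∧ (e, i) ∈ pa ∧ ∀ q ∈ pa, q.1 = e → i ≤ q.2) :=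
  pv_mem_merge_aux pa.length pa sb (Nat.le_refl _) hpa hsb i e

-- The sweep's output values strictly increase (hence it is duplicate-free).
theorem pv_merge_pairwise_aux :
    ∀ (n : Nat) (pa : List (Int × Int)) (sb : List Int), pa.length ≤ n →
      pa.Pairwise (fun p q => p.1 ≤ q.1) → sb.Pairwise (fun x y => x ≤ y) →
      (pvMerge pa sb).Pairwise (fun p q => p.2 < q.2) := by
  intro n
  induction n with
  | zero =>
    intro pa sb hl _ _
    have : pa = [] := List.eq_nil_of_length_eq_zero (Nat.le_zero.mp hl)
    subst this; simp [pvMerge_nil]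
  | succ n ih =>
    intro pa sb hl hpa hsb
    match pa with
    | [] => simp [pvMerge_nil]
    | (e0, i0) :: rest =>
      have hp' := List.pairwise_cons.mp hpa
      have hge : ∀ q ∈ rest, e0 ≤ q.1 := hp'.1
      have hrestpw : rest.Pairwise (fun p q : Int × Int => p.1 ≤ q.1) := hp'.2
      have hbig : ∀ q ∈ rest.dropWhile (fun q => q.1 == e0), e0 < q.1 :=
        pv_rest_big e0 rest hrestpw hge
      have hlen : (rest.dropWhile (fun q => q.1 == e0)).length ≤ n := by
        have h1 : (rest.dropWhile (fun q => q.1 == e0)).length ≤ rest.length :=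
          (List.dropWhile_sublist _).length_le
        have h2 : rest.length ≤ n := Nat.le_of_succ_le_succ (by simpa using hl)
        omega
      have hpw' : (rest.dropWhile (fun q => q.1 == e0)).Pairwise (fun p q : Int × Int => p.1 ≤ q.1) :=
        List.Pairwise.sublist (List.dropWhile_sublist _) hrestpw
      have hsbpw' : (sb.dropWhile (fun x => x < e0)).Pairwise (fun x y : Int => x ≤ y) :=
        List.Pairwise.sublist (List.dropWhile_sublist _) hsb
      have IH := ih _ _ hlen hpw' hsbpw'
      rw [pvMerge_cons]
      by_cases hc : ((sb.dropWhile (fun x => x < e0)).head? = some e0)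
      · rw [if_pos (by simpa using hc)]
        refine List.pairwise_cons.mpr ⟨?_, IH⟩
        intro q hq
        have hmem := (pv_mem_merge _ _ hpw' hsbpw' q.1 q.2).mp (by simpa using hq)
        have := hbig _ hmem.2.1
        simpa using this
      · rw [if_neg (by simpa using hc)]
        exact IH

-- ---------- pz = zip a (range n): basic structure ----------

theorem pv_zip_snd_pairwise (a : List Int) (r : List Int) (hr : r.Pairwise (fun x y => x < y)) :
    (a.zip r).Pairwise (fun p q : Int × Int => p.2 < q.2) := by
  induction a generalizing r with
  | nil => simp
  | cons x t ih =>
    match r with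
    | [] => simp
    | y :: r' =>
      have h1 : ∀ z ∈ r', y < z := (List.pairwise_cons.mp hr).1
      have h2 : r'.Pairwise (fun x y : Int => x < y) := (List.pairwise_cons.mp hr).2
      rw [List.zip_cons_cons]
      refine List.pairwise_cons.mpr ⟨?_, ih r' h2⟩
      intro q hq
      have := List.of_mem_zip hq
      exact h1 _ this.2

-- A's program equals the canonical first-occurrence recursion.
theorem pv_A_eq_Gv (a b : List Int) : intersezione_liste a b = pvGv a b := by
  unfold intersezione_liste
  rw [pv_loop a b _ (pv_d_contains b) PySem.Dict.empty (by simp)]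
  simpa using pv_fold_gv b a []

-- B's program equals the indexed canonical recursion projected to values.
theorem pv_B_eq_Gidx (a b : List Int) :
    intersezione_liste_alt a b
      = (pvGidx (a.zip (PySem.List.pyRange 0 (a.length : Int) 1)) b).map Prod.snd := by
  show (PySem.List.sorted
      (pvMerge (PySem.List.sorted (a.zip (PySem.List.pyRange 0 (a.length : Int) 1)) (fun p => p.1) false)
               (PySem.List.sorted b (fun x => x) false))
      (fun p => p.1) false).map (fun p => p.2)
    = (pvGidx (a.zip (PySem.List.pyRange 0 (a.length : Int) 1)) b).map Prod.snd
  set pz : List (Int × Int) := a.zip (PySem.List.pyRange 0 (a.length : Int) 1) with hpz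
  set pa := PySem.List.sorted pz (fun p => p.1) false with hpadef
  set sb := PySem.List.sorted b (fun x => x) false with hsbdef
  have hz : pz.Pairwise (fun p q : Int × Int => p.2 < q.2) :=
    pv_zip_snd_pairwise a _ (PySem.List.pairwise_lt_pyRange_one ..)
  have hpapw : pa.Pairwise (fun p q : Int × Int => p.1 ≤ q.1) :=
    PySem.List.sorted_pairwise ..
  have hsbpw : sb.Pairwise (fun x y : Int => x ≤ y) :=
    PySem.List.sorted_pairwise ..
  have hpamem : ∀ p : Int × Int, p ∈ pa ↔ p ∈ pz := fun p => PySem.List.mem_sorted ..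
  have hsbmem : ∀ x : Int, x ∈ sb ↔ x ∈ b := fun x => PySem.List.mem_sorted ..
  have hmemiff : ∀ p : Int × Int, p ∈ pvMerge pa sb ↔ p ∈ pvGidx pz b := by
    intro p
    obtain ⟨i, e⟩ := p
    rw [pv_mem_merge pa sb hpapw hsbpw i e, pv_mem_Gidx pz b hz i e]
    constructor
    · rintro ⟨h1, h2, h3⟩
      exact ⟨(hsbmem e).mp h1, (hpamem _).mp h2, fun q hq => h3 q ((hpamem q).mpr hq)⟩
    · rintro ⟨h1, h2, h3⟩
      exact ⟨(hsbmem e).mpr h1, (hpamem _).mpr h2, fun q hq => h3 q ((hpamem q).mp hq)⟩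
  have hmnd : (pvMerge pa sb).Nodup := by
    have := pv_merge_pairwise_aux pa.length pa sb (Nat.le_refl _) hpapw hsbpw
    exact this.imp (fun {p q} h => by intro hpq; rw [hpq] at h; omega)
  have hgpw : (pvGidx pz b).Pairwise (fun p q : Int × Int => p.1 < q.1) :=
    pv_pairwise_Gidx_aux b pz.length pz (Nat.le_refl _) hz
  have hgnd : (pvGidx pz b).Nodup :=
    hgpw.imp (fun {p q} h => by intro hpq; rw [hpq] at h; omega)
  have hperm : (pvGidx pz b).Perm (pvMerge pa sb) :=
    (List.perm_ext_iff_of_nodup hgnd hmnd).mpr (fun p => (hmemiff p).symm)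
  have hsorted : PySem.List.sorted (pvMerge pa sb) (fun p => p.1) false = pvGidx pz b :=
    PySem.List.sorted_eq_of_perm_of_pairwise_lt _ _ _ hperm hgpw
  rw [hsorted]

-- ===== VERDICT (by name: the statement is the Claim_ definition above) =====
theorem pv_range_len_zero (n : Nat) : (PySem.List.pyRange 0 (n : Int) 1).length = n := by
  rw [PySem.List.length_pyRange_one]
  simp

theorem intersezione_liste_spec : Claim_equal_intersezione_liste := by
  intro a b _
  unfold Spec_intersezione_liste
  rw [pv_A_eq_Gv, pv_B_eq_Gidx, pvGidx_map_snd]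
  congr 1
  exact (List.map_fst_zip (le_of_eq (pv_range_len_zero a.length).symm)).symm
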